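-- pv_equiv track=rewrite | github.com/gustafsson/backtrace | trace_perf/make_dump_summary.py | group_iter
-- ===== SOURCE A (Python) =====
-- def group_iter(iterator, n, strict=False):
--     """ Transforms a sequence of values into a sequence of n-tuples.
--     e.g. [1, 2, 3, 4, ...] => [(1, 2), (3, 4), ...] (when n == 2)
--     If strict, then it will raise ValueError if there is a group of fewer
--     than n items at the end of the sequence. """
--     accumulator = []
--     for item in iterator:
--         accumulator.append(item)
--         if len(accumulator) == n: # tested as fast as separate counter
--             yield tuple(accumulator)
--             accumulator = [] # tested faster than accumulator[:] = []
--             # and tested as fast as re-using one list object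
--     if len(accumulator) != 0:
--         if strict:
--             raise ValueError("Leftover values")
--         yield tuple(accumulator)
-- ===== SOURCE B (Python) =====
-- def group_iter(iterator, n, strict=False):
--     """ Transforms a sequence of values into a sequence of n-tuples.
--     e.g. [1, 2, 3, 4, ...] => [(1, 2), (3, 4), ...] (when n == 2)
--     If strict, then it will raise ValueError if there is a group of fewer
--     than n items at the end of the sequence. """
--     it = iter(iterator)
--     while True:
--         chunk = []
--         for _ in range(n):
--             try:
--                 chunk.append(next(it))
--             except StopIteration:
--                 break
--         if not chunk:
--             return
--         if len(chunk) == n: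
--             yield tuple(chunk)
--         elif strict:
--             raise ValueError("Leftover values")
--         else:
--             yield tuple(chunk)
--             return
-- ===== Notes on version B (the rewrite author's own statement) =====
-- stated objective: alternative
-- what changed: B pulls up to n items per step from an explicit iterator (one chunk per loop iteration) instead of A's per-item accumulator list with a length test on every element; Pre_ excludes the strict-mode inputs where A raises ValueError('Leftover values').
-- intended difference: For n <= 0 with a non-empty input, A's len(accumulator)==n test never fires so A returns the whole sequence as one accidental oversized group, while B yields nothing because no group of n items can ever be formed, the intended reading of a nonpositive group size. — e.g. on group_iter([1], 0, false): A returns [[1]], B returns []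
import Mathlib
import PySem

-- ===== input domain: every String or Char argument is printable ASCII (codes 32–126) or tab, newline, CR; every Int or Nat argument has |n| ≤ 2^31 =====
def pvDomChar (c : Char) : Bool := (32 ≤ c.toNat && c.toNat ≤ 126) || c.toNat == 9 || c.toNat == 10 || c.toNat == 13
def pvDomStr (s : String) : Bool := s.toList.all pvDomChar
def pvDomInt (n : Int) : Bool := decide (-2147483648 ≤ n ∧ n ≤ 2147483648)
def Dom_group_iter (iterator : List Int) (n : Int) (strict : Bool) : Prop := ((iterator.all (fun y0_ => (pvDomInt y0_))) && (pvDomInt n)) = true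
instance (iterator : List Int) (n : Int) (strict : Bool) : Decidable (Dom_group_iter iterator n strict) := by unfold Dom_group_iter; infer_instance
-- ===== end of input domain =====

-- B pulls up to n items per step from an explicit iterator instead of A's per-item
-- accumulator with a length test; the strict-mode ValueError is excluded by Pre_,
-- and on n ≤ 0 (stated as D_) B yields nothing where A returns one oversized group.

-- ===== PORT A =====
-- one step of A's for-loop: append the item, flush when the accumulator length reaches n
def stepA (n : Int) (st : List (List Int) × List Int) (item : Int) : List (List Int) × List Int :=
  let acc := st.2 ++ [item]
  if (acc.length : Int) = n then (st.1 ++ [acc], []) else (st.1, acc)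

def group_iter (iterator : List Int) (n : Int) (strict : Bool) : List (List Int) :=
  let s := iterator.foldl (stepA n) ([], [])
  -- trailing `if len(accumulator) != 0` (the strict `raise` there is outside Pre_)
  if s.2 = [] then s.1 else s.1 ++ [s.2]

-- ===== PORT B =====
-- B's `while True` loop: pull up to n items (`for _ in range(n): next(it)` = take n.toNat
-- of the remaining list), stop on an empty chunk, yield full chunks and recurse, and a
-- short final chunk is yielded last (the strict `raise` there is outside Pre_).
def chunksB (n : Int) (l : List Int) : List (List Int) :=
  let chunk := l.take n.toNat
  if chunk = [] then []
  else if (chunk.length : Int) = n then chunk :: chunksB n (l.drop n.toNat)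
  else [chunk]
  termination_by l.length
  decreasing_by
    rename_i h _
    have hl : 0 < l.length := List.length_pos_of_ne_nil (by intro hl; subst hl; simp [chunk] at h)
    have hn : 0 < n.toNat := Nat.pos_of_ne_zero (by intro hn; simp [chunk, hn] at h)
    rw [List.length_drop]
    omega

def group_iter_alt (iterator : List Int) (n : Int) (strict : Bool) : List (List Int) :=
  chunksB n iterator

-- ===== PRECONDITION & SPEC =====
-- Pre_ excludes exactly the inputs where A raises ValueError("Leftover values"):
-- strict = true with a non-empty leftover group.
def Pre_group_iter (iterator : List Int) (n : Int) (strict : Bool) : Prop :=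
  strict = true → (if 0 < n then (iterator.length : Int) % n = 0 else iterator = [])
instance (iterator : List Int) (n : Int) (strict : Bool) : Decidable (Pre_group_iter iterator n strict) := by unfold Pre_group_iter; infer_instance
def pvWitness_group_iter : List Int × Int × Bool := ([1, 2, 3, 4], 2, true)

-- On n ≤ 0 with a non-empty input A's `len(accumulator) == n` test never fires, so A
-- returns the whole sequence as one accidental oversized group; B yields nothing, the
-- intended reading that no group of n items can ever be formed.
def D_group_iter (iterator : List Int) (n : Int) (strict : Bool) : Prop :=
  n ≤ 0 ∧ iterator ≠ []
instance (iterator : List Int) (n : Int) (strict : Bool) : Decidable (D_group_iter iterator n strict) := by unfold D_group_iter; infer_instance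

def Spec_group_iter (iterator : List Int) (n : Int) (strict : Bool) (out : List (List Int)) : Prop := ¬ D_group_iter iterator n strict → out = group_iter_alt iterator n strict
instance (iterator : List Int) (n : Int) (strict : Bool) (out : List (List Int)) : Decidable (Spec_group_iter iterator n strict out) := by unfold Spec_group_iter; infer_instance

def pvDiffWitness_group_iter : List Int × Int × Bool := ([1], 0, false)
def pvDiffWitnessOut_group_iter : (List (List Int)) × (List (List Int)) := ([[1]], [])

-- ===== CLAIM (what is proved, stated in full; the proofs are below) =====
def Claim_unchanged_group_iter : Prop := ∀ (iterator : List Int) (n : Int) (strict : Bool), Dom_group_iter iterator n strict → Pre_group_iter iterator n strict → Spec_group_iter iterator n strict (group_iter iterator n strict)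
def Claim_changed_group_iter : Prop := Dom_group_iter (pvDiffWitness_group_iter.1) (pvDiffWitness_group_iter.2.1) (pvDiffWitness_group_iter.2.2) ∧ Pre_group_iter (pvDiffWitness_group_iter.1) (pvDiffWitness_group_iter.2.1) (pvDiffWitness_group_iter.2.2) ∧ D_group_iter (pvDiffWitness_group_iter.1) (pvDiffWitness_group_iter.2.1) (pvDiffWitness_group_iter.2.2) ∧ group_iter (pvDiffWitness_group_iter.1) (pvDiffWitness_group_iter.2.1) (pvDiffWitness_group_iter.2.2) = pvDiffWitnessOut_group_iter.1 ∧ group_iter_alt (pvDiffWitness_group_iter.1) (pvDiffWitness_group_iter.2.1) (pvDiffWitness_group_iter.2.2) = pvDiffWitnessOut_group_iter.2 ∧ pvDiffWitnessOut_group_iter.1 ≠ pvDiffWitnessOut_group_iter.2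
def Claim_exact_group_iter : Prop := ∀ (iterator : List Int) (n : Int) (strict : Bool), Dom_group_iter iterator n strict → Pre_group_iter iterator n strict → D_group_iter iterator n strict → group_iter iterator n strict ≠ group_iter_alt iterator n strict

-- ===== LEMMAS AND PROOFS =====

-- the finishing step shared by the lemmas: yield the leftover accumulator if non-empty
def finishA (s : List (List Int) × List Int) : List (List Int) :=
  if s.2 = [] then s.1 else s.1 ++ [s.2]

-- if the accumulator can never reach length n over l, the fold just appends l
lemma fold_no_flush (n : Int) : ∀ (l acc : List Int) (out : List (List Int)),
    (∀ k : Nat, acc.length < k → k ≤ acc.length + l.length → (k : Int) ≠ n) →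
    List.foldl (stepA n) (out, acc) l = (out, acc ++ l) := by
  intro l
  induction l with
  | nil => intro acc out _; simp
  | cons x xs ih =>
    intro acc out h
    have hne : ((acc ++ [x]).length : Int) ≠ n := by
      have := h (acc.length + 1) (by omega) (by simp)
      simpa using this
    simp only [List.foldl_cons, stepA]
    rw [if_neg hne]
    rw [ih (acc ++ [x]) out (by intro k h1 h2; simp at h1 h2; exact h k (by omega) (by simp; omega))]
    simp

-- flushing step: with n - |acc| items still to absorb, the first flush happens right there
lemma fold_flush (n : Int) (hn : 1 ≤ n) : ∀ (l acc : List Int) (out : List (List Int)),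
    (acc.length : Int) < n → n ≤ (acc.length : Int) + l.length →
    List.foldl (stepA n) (out, acc) l
      = List.foldl (stepA n) (out ++ [acc ++ l.take (n - acc.length).toNat], []) (l.drop (n - acc.length).toNat) := by
  intro l
  induction l with
  | nil => intro acc out h1 h2; simp at h2; omega
  | cons x xs ih =>
    intro acc out h1 h2
    by_cases hfl : ((acc ++ [x]).length : Int) = n
    · have hk : (n - (acc.length : Int)).toNat = 1 := by simp at hfl; omega
      simp only [List.foldl_cons, stepA]
      rw [if_pos hfl, hk]
      simp
    · have h1' : ((acc ++ [x]).length : Int) < n := by simp at hfl ⊢; omega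
      have h2' : n ≤ ((acc ++ [x]).length : Int) + xs.length := by simp at h2 ⊢; omega
      simp only [List.foldl_cons, stepA]
      rw [if_neg hfl]
      rw [ih (acc ++ [x]) out h1' h2']
      have hk : (n - (acc.length : Int)).toNat = (n - ((acc ++ [x]).length : Int)).toNat + 1 := by
        simp; omega
      rw [hk]
      simp [List.append_assoc]

-- main invariant for n ≥ 1: A's fold-and-finish equals B's chunk recursion
lemma main_pos (n : Int) (hn : 1 ≤ n) : ∀ (N : Nat) (l : List Int), l.length ≤ N →
    ∀ (out : List (List Int)),
    finishA (List.foldl (stepA n) (out, []) l) = out ++ chunksB n l := by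
  intro N
  induction N with
  | zero =>
    intro l hl out
    have : l = [] := by cases l <;> simp_all
    subst this
    rw [chunksB]
    simp [finishA]
  | succ N ih =>
    intro l hl out
    have hpos : 0 < n.toNat := by omega
    by_cases hc : n.toNat ≤ l.length
    · have hlne : l ≠ [] := by intro h; subst h; simp at hc; omega
      have hfl := fold_flush n hn l [] out (by simpa using hn) (by simp; omega)
      simp only [List.length_nil, Nat.cast_zero, Int.sub_zero] at hfl
      rw [hfl]
      have hdrop : (l.drop n.toNat).length ≤ N := by simp; omega
      rw [ih (l.drop n.toNat) hdrop (out ++ [[] ++ l.take n.toNat])]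
      conv_rhs => rw [chunksB]
      have hch : l.take n.toNat ≠ [] := by
        simp [List.take_eq_nil_iff]; exact ⟨by omega, hlne⟩
      rw [if_neg hch]
      have hlen : ((l.take n.toNat).length : Int) = n := by
        simp [List.length_take]; omega
      rw [if_pos hlen]
      simp
    · have hsmall : l.length < n.toNat := by omega
      rw [fold_no_flush n l [] out (by intro k h1 h2; simp at h1 h2; omega)]
      rw [chunksB]
      have htk : l.take n.toNat = l := List.take_of_length_le (by omega)
      rw [htk]
      cases hl0 : l with
      | nil => simp [finishA]
      | cons x xs =>
        rw [if_neg (by simp)]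
        have : ((l.length : Int) ≠ n) := by omega
        rw [hl0] at this
        rw [if_neg this]
        simp [finishA]

lemma main_nonpos (n : Int) (hn : n ≤ 0) (l : List Int) :
    List.foldl (stepA n) (([] : List (List Int)), ([] : List Int)) l = ([], l) := by
  have := fold_no_flush n l [] [] (by intro k h1 h2; simp at h1; omega)
  simpa using this

-- ===== VERDICT (by name: the statement is the Claim_ definition above) =====
theorem group_iter_spec : Claim_unchanged_group_iter := by
  intro iterator n strict _ _
  unfold Spec_group_iter
  intro hnd
  unfold group_iter group_iter_alt
  by_cases hn : n ≤ 0
  · have hit : iterator = [] := by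
      by_contra h
      exact hnd ⟨hn, h⟩
    subst hit
    rw [chunksB]
    simp [main_nonpos n hn]
  · have hn' : 1 ≤ n := by omega
    have := main_pos n hn' iterator.length iterator le_rfl []
    simpa [finishA] using this

theorem group_iter_changed : Claim_changed_group_iter := by
  unfold Claim_changed_group_iter
  refine ⟨by decide, by decide, by decide, by decide, ?_, by decide⟩
  show group_iter_alt [1] 0 false = []
  unfold group_iter_alt
  rw [chunksB]
  decide

theorem group_iter_tight : Claim_exact_group_iter := by
  intro iterator n strict _ _ hd
  obtain ⟨hn, hne⟩ := hd
  unfold group_iter group_iter_alt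
  rw [main_nonpos n hn, chunksB]
  have : iterator.take n.toNat = [] := by
    have : n.toNat = 0 := by omega
    simp [this]
  rw [this]
  simp [hne]
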